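-- pv_equiv track=rewrite | github.com/wangzhon150/Personal-RPG | progress.py | get_level_per_xp
-- ===== SOURCE A (Python) =====
-- def get_xp_per_level(lvl: int) -> int:
--     if lvl <= 0:
--         return 0
--     elif lvl == 1:
--         return 5
--     elif lvl == 2:
--         return 10
--     else:
--         return get_xp_per_level(lvl-1) + get_xp_per_level(lvl-2)
--
-- def get_level_per_xp(xp: int) -> int:
--     if xp <= 4:
--         return 0
--     else:
--         lvl = 1
--         while True:
--             if xp < get_xp_per_level(lvl):
--                 return lvl-1
--             lvl += 1
-- ===== SOURCE B (Python) =====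
-- def get_level_per_xp(xp: int) -> int:
--     if xp <= 4:
--         return 0
--     lvl, a, b = 1, 5, 10
--     while b <= xp:
--         lvl, a, b = lvl + 1, b, a + b
--     return lvl
-- ===== Notes on version B (the rewrite author's own statement) =====
-- stated objective: faster
-- what changed: Replaces the per-level exponential double recursion get_xp_per_level(Fibonacci recomputed from scratch at each level) with a single loop that carries the last two thresholds and extends them incrementally until xp falls below the next one.
import Mathlib
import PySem

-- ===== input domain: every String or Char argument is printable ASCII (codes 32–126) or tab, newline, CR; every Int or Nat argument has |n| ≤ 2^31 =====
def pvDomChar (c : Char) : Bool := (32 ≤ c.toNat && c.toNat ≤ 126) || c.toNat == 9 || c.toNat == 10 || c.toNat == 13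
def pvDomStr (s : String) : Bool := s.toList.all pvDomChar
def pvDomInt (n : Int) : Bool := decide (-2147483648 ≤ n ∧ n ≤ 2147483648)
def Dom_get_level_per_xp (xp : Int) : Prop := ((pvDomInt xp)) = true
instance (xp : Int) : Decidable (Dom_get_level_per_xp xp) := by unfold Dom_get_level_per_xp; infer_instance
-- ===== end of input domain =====

-- B replaces A's exponential double recursion per level by one loop that carries the last
-- two Fibonacci thresholds incrementally (objective: faster, asymptotic).

-- ===== PORT A =====
-- helper get_xp_per_level, A's double recursion, literally
def get_xp_per_level (lvl : Int) : Int :=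
  if lvl ≤ 0 then 0
  else if lvl = 1 then 5
  else if lvl = 2 then 10
  else get_xp_per_level (lvl - 1) + get_xp_per_level (lvl - 2)
termination_by lvl.toNat
decreasing_by all_goals omega

-- A's 'while True' loop; fuel only bounds the iteration count (never reached on Dom, proved below)
def pvLoopA (xp lvl : Int) : Nat → Int
  | 0 => 0
  | fuel + 1 =>
    if xp < get_xp_per_level lvl then lvl - 1
    else pvLoopA xp (lvl + 1) fuel

def get_level_per_xp (xp : Int) : Int :=
  if xp ≤ 4 then 0
  else pvLoopA xp 1 (xp.toNat + 1)

-- ===== PORT B =====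
-- B's 'while b <= xp' loop; fuel only bounds the iteration count (never reached on Dom)
def pvLoopB (xp lvl a b : Int) : Nat → Int
  | 0 => lvl
  | fuel + 1 =>
    if b ≤ xp then pvLoopB xp (lvl + 1) b (a + b) fuel
    else lvl

def get_level_per_xp_alt (xp : Int) : Int :=
  if xp ≤ 4 then 0
  else pvLoopB xp 1 5 10 xp.toNat

-- ===== PRECONDITION & SPEC =====
def Spec_get_level_per_xp (xp : Int) (out : Int) : Prop := out = get_level_per_xp_alt xp
instance (xp : Int) (out : Int) : Decidable (Spec_get_level_per_xp xp out) := by unfold Spec_get_level_per_xp; infer_instance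

-- ===== CLAIM (what is proved, stated in full; the proofs are below) =====
def Claim_equal_get_level_per_xp : Prop := ∀ (xp : Int), Dom_get_level_per_xp xp → Spec_get_level_per_xp xp (get_level_per_xp xp)

-- ===== LEMMAS AND PROOFS =====

theorem fib_one : get_xp_per_level 1 = 5 := by simp [get_xp_per_level]

theorem fib_two : get_xp_per_level 2 = 10 := by simp [get_xp_per_level]

theorem fib_rec (lvl : Int) (h : 3 ≤ lvl) :
    get_xp_per_level lvl = get_xp_per_level (lvl - 1) + get_xp_per_level (lvl - 2) := by
  rw [get_xp_per_level]
  have h0 : ¬ lvl ≤ 0 := by omega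
  have h1 : lvl ≠ 1 := by omega
  have h2 : lvl ≠ 2 := by omega
  simp [h0, h1, h2]

-- growth: the threshold at level n+1 is at least 5(n+1)
theorem fib_lower : ∀ n : Nat, 5 * (n : Int) + 5 ≤ get_xp_per_level ((n : Int) + 1) := by
  intro n
  induction n using Nat.strong_induction_on with
  | _ n ih =>
    match n with
    | 0 => simp [fib_one]
    | 1 => norm_num [fib_two]
    | Nat.succ (Nat.succ k) =>
      have h1 := ih (k + 1) (by omega)
      have h2 := ih k (by omega)
      have hr := fib_rec ((k : Int) + 3) (by omega)
      have e1 : (k : Int) + 3 - 1 = (k : Int) + 1 + 1 := by ring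
      have e2 : (k : Int) + 3 - 2 = (k : Int) + 1 := by ring
      rw [e1, e2] at hr
      have hc1 : ((k + 1 : Nat) : Int) = (k : Int) + 1 := by push_cast; ring
      rw [hc1] at h1
      have hc : ((Nat.succ (Nat.succ k) : Nat) : Int) = (k : Int) + 2 := by push_cast; ring
      rw [hc, show (k : Int) + 2 + 1 = (k : Int) + 3 from by ring]
      omega

-- once past level lvl's threshold, A's scan and B's incremental loop agree
theorem loop_agree (xp : Int) : ∀ (fuel : Nat) (lvl : Int), 1 ≤ lvl →
    get_xp_per_level lvl ≤ xp → xp < get_xp_per_level (lvl + (fuel : Int)) →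
    pvLoopA xp (lvl + 1) fuel = pvLoopB xp lvl (get_xp_per_level lvl) (get_xp_per_level (lvl + 1)) fuel := by
  intro fuel
  induction fuel with
  | zero => intro lvl _ hle hlt; simp at hlt; omega
  | succ f ih =>
    intro lvl hlvl hle hlt
    rw [pvLoopA, pvLoopB]
    by_cases hb : get_xp_per_level (lvl + 1) ≤ xp
    · have hnb : ¬ xp < get_xp_per_level (lvl + 1) := by omega
      simp only [hnb, hb, if_pos, if_false]
      have hsum : get_xp_per_level lvl + get_xp_per_level (lvl + 1)
          = get_xp_per_level (lvl + 1 + 1) := by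
        have := fib_rec (lvl + 2) (by omega)
        have e1 : lvl + 2 - 1 = lvl + 1 := by ring
        have e2 : lvl + 2 - 2 = lvl := by ring
        rw [e1, e2] at this
        have e3 : lvl + 1 + 1 = lvl + 2 := by ring
        rw [e3, this]; ring
      rw [hsum]
      have e4 : lvl + 1 + (f : Int) = lvl + ((f : Nat) + 1 : Nat) := by push_cast; ring
      have := ih (lvl + 1) (by omega) hb (by rw [e4]; exact hlt)
      rw [show lvl + 1 + 1 = lvl + 2 by ring] at this ⊢
      exact this
    · have hxb : xp < get_xp_per_level (lvl + 1) := by omega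
      simp [hxb, hb]
  
theorem toNat_big (xp : Int) (h : 5 ≤ xp) : xp < get_xp_per_level (1 + ((xp.toNat : Int))) := by
  have hn := fib_lower xp.toNat
  have : (xp.toNat : Int) = xp := by omega
  rw [this] at hn
  have e : 1 + (xp.toNat : Int) = (xp.toNat : Int) + 1 := by ring
  rw [e, this]
  omega

-- ===== VERDICT (by name: the statement is the Claim_ definition above) =====
theorem get_level_per_xp_spec : Claim_equal_get_level_per_xp := by
  intro xp _
  unfold Spec_get_level_per_xp get_level_per_xp get_level_per_xp_alt
  by_cases h4 : xp ≤ 4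
  · simp [h4]
  · simp only [h4, if_neg, not_false_iff]
    have h5 : 5 ≤ xp := by omega
    have hN : xp.toNat + 1 = (xp.toNat - 1 + 1) + 1 := by omega
    rw [hN, pvLoopA]
    have hge : ¬ xp < get_xp_per_level 1 := by rw [fib_one]; omega
    simp only [hge, if_neg, not_false_iff]
    have hfu : xp.toNat - 1 + 1 = xp.toNat := by omega
    rw [hfu]
    have := loop_agree xp xp.toNat 1 (by omega) (by rw [fib_one]; omega)
      (by exact toNat_big xp h5)
    rw [fib_one] at this
    simp only [show (1 : Int) + 1 = 2 from by norm_num, fib_two] at this ⊢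
    exact this
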